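-- pv_equiv track=rewrite | github.com/ZLJett/Budget-App-Project | main.py | create_chart_labels
-- ===== SOURCE A (Python) =====
-- def create_chart_labels(category_names):
--   list_of_rows = []
--   category_count = len(category_names)
--   category_names_list = [category_names[x]["name"] for x in range(len(category_names))]
--   left_padding = "    " # 4 whitespace, this covers the blank space on left side of the dashes
--   row_count = len(max(category_names_list, key=len)) # the number of rows I want to create
--
--   # create first row of dashes
--   first_line = "-" * (1 + category_count + (category_count * 2)) # one for first blank column, number of columns, plus two spaces after each column
--   first_row = left_padding + first_line
--   list_of_rows.append(first_row)
--
--   # construct each row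
--   # note here that the row count is being used as an index count, staring at
--   for row in range(row_count):
--     row_string = ""
--     row_string += left_padding + " " # this adds padding then that first empty space
--
--     for name in category_names_list:
--       try:
--         row_string += (name[row])
--       except IndexError:
--         row_string += " "
--       # adds the two blank spaces after each category
--       row_string += "  "
--
--     # Add created row to list of rows
--     list_of_rows.append(row_string)
--
--   # return the list of rows
--   return list_of_rows
-- ===== SOURCE B (Python) =====
-- def create_chart_labels(category_names):
--     names = [d["name"] for d in category_names]
--     width = len(max(names, key=len))
--     padded = [n.ljust(width) for n in names]
--     body = ["     " + "".join(c + "  " for c in chars) for chars in zip(*padded)]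
--     return ["    " + "-" * (3 * len(names) + 1)] + body
-- ===== Notes on version B (the rewrite author's own statement) =====
-- stated objective: idiomatic
-- what changed: Replaces the per-row, per-name try/except-IndexError character lookup in nested index loops with a single pad-to-width (ljust) pass followed by a zip(*) transpose that yields each chart row directly.
import Mathlib
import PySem

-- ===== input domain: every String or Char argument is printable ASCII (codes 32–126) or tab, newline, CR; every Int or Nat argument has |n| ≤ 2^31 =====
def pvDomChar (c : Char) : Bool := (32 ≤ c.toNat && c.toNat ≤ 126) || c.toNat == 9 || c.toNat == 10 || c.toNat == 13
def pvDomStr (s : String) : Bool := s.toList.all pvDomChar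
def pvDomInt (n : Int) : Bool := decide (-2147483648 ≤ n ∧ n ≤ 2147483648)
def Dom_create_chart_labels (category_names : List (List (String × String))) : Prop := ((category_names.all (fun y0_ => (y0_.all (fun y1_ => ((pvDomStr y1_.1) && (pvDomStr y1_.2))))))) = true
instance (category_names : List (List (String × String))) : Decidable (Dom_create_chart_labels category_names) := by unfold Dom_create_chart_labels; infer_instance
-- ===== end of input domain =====

-- B replaces A's per-cell try/except-IndexError nested index loops by a pad-to-width pass and a zip(*) transpose (idiomatic decomposition, same cost).


-- ===== PORT A =====
-- Literal port of A. dicts are association lists, category_names[x]["name"] is first-match lookup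
-- (Pre_ guarantees the key is present, so the `.getD ""` KeyError default never fires inside Pre_);
-- "-" * n is String.ofList (List.replicate n '-'), exact for n ≥ 0; the try/except IndexError on name[row]
-- is `(PySem.Str.pyGet? name row).getD ' '` (pyGet? is none exactly where Python raises IndexError).
def create_chart_labels (category_names : List (List (String × String))) : List String :=
  let list_of_rows : List String := []
  let category_count : Nat := category_names.length
  let category_names_list : List String :=
    (List.range category_names.length).map (fun (x : Nat) =>
      (((PySem.List.pyGet? category_names (x : Int)).getD []).lookup "name").getD "")
  let left_padding : String := "    "
  -- len(...) is nonnegative, so .toNat is exact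
  let row_count : Nat :=
    Int.toNat <| PySem.Str.len ((PySem.List.max? category_names_list (fun n => PySem.Str.len n)).getD "")
  let first_line : String := String.ofList (List.replicate (1 + category_count + category_count * 2) '-')
  let first_row : String := left_padding ++ first_line
  let list_of_rows : List String := list_of_rows ++ [first_row]
  let list_of_rows : List String :=
    (List.range row_count).foldl (fun (rows : List String) (row : Nat) =>
      let row_string : String := "" ++ (left_padding ++ " ")
      let row_string : String :=
        category_names_list.foldl (fun s name =>
          (s ++ String.ofList [(PySem.Str.pyGet? name (row : Int)).getD ' ']) ++ "  ") row_string
      rows ++ [row_string]) list_of_rows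
  list_of_rows

-- ===== PORT B =====
-- zip(*padded) on the padded (equal-length) char lists: take heads while every list is nonempty.
def pvZipStar (xss : List (List Char)) : List (List Char) :=
  if _h : xss = [] ∨ xss.any List.isEmpty then []
  else (xss.map (fun p => p.headD ' ')) :: pvZipStar (xss.map List.tail)
termination_by (xss.headD []).length
decreasing_by
  rw [not_or] at _h
  obtain ⟨h1, h2⟩ := _h
  match xss, h1, h2 with
  | x :: rest, _, h2 =>
    simp only [List.any_cons, Bool.or_eq_true, not_or] at h2
    simp only [List.headD_cons]
    cases x with
    | nil => simp at h2
    | cons c cs => simp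

-- Literal port of Source B: names by direct map, width = len(max(names, key=len)),
-- n.ljust(width) is n.toList ++ replicate (width - len) ' ', body rows from the transpose,
-- "".join(c + "  " for c in chars) is PySem.Chars.join [] over the per-char pieces.
def create_chart_labels_alt (category_names : List (List (String × String))) : List String :=
  let names : List String := category_names.map (fun d => (d.lookup "name").getD "")
  let width : Nat :=
    Int.toNat <| PySem.Str.len ((PySem.List.max? names (fun n => PySem.Str.len n)).getD "")
  let padded : List (List Char) :=
    names.map (fun n => n.toList ++ List.replicate (width - n.toList.length) ' ')
  -- "".join(c + "  " for c in chars): joining on the empty separator is concatenation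
  let body : List String := (pvZipStar padded).map (fun chars =>
    "     " ++ String.ofList (chars.flatMap (fun c => [c, ' ', ' '])))
  ("    " ++ String.ofList (List.replicate (3 * names.length + 1) '-')) :: body

-- ===== PRECONDITION & SPEC =====
-- Pre_ excludes exactly the inputs where the Python A raises: the empty list (max() of an empty
-- sequence is a ValueError) and any category dict without a "name" key (KeyError).
def Pre_create_chart_labels (category_names : List (List (String × String))) : Prop :=
  category_names ≠ [] ∧ ∀ d ∈ category_names, (d.lookup "name").isSome = true
instance (category_names : List (List (String × String))) : Decidable (Pre_create_chart_labels category_names) := by unfold Pre_create_chart_labels; infer_instance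

def pvWitness_create_chart_labels : (List (List (String × String))) :=
  [[("name", "Food")], [("name", "Rent")]]

def Spec_create_chart_labels (category_names : List (List (String × String))) (out : List String) : Prop := out = create_chart_labels_alt category_names
instance (category_names : List (List (String × String))) (out : List String) : Decidable (Spec_create_chart_labels category_names out) := by unfold Spec_create_chart_labels; infer_instance

-- ===== CLAIM (what is proved, stated in full; the proofs are below) =====
def Claim_equal_create_chart_labels : Prop := ∀ (category_names : List (List (String × String))), Dom_create_chart_labels category_names → Pre_create_chart_labels category_names → Spec_create_chart_labels category_names (create_chart_labels category_names)

-- ===== LEMMAS AND PROOFS =====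

-- A's index-driven comprehension over range(len) builds the same names list as B's direct map.
lemma names_range_map (l : List (List (String × String))) :
    (List.range l.length).map (fun (x : Nat) =>
        (((PySem.List.pyGet? l (x : Int)).getD []).lookup "name").getD "")
      = l.map (fun d => (d.lookup "name").getD "") := by
  have h : (List.range l.length).map (fun (x : Nat) => (PySem.List.pyGet? l (x : Int)).getD []) = l := by
    apply List.ext_getElem
    · simp
    · intro i h1 h2
      simp [PySem.List.pyGet?_natCast, List.getElem?_eq_getElem h2]
  calc (List.range l.length).map (fun (x : Nat) =>
          (((PySem.List.pyGet? l (x : Int)).getD []).lookup "name").getD "")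
      = ((List.range l.length).map (fun (x : Nat) => (PySem.List.pyGet? l (x : Int)).getD [])).map
          (fun d => (d.lookup "name").getD "") := by simp [Function.comp]
    _ = l.map (fun d => (d.lookup "name").getD "") := by rw [h]

-- String-fold shape: appending g a per element, seen on the char-list side.
lemma foldl_str_toList {α : Type} (l : List α) (g : α → String) (init : String) :
    (l.foldl (fun s a => s ++ g a) init).toList
      = init.toList ++ (l.map (fun a => (g a).toList)).flatten := by
  induction l generalizing init with
  | nil => simp
  | cons x t ih => simp [ih, List.append_assoc]

-- ljust-then-index equals index-with-default.
lemma pad_getD (l : List Char) (w r : Nat) :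
    (l ++ List.replicate (w - l.length) ' ').getD r ' ' = (l[r]?).getD ' ' := by
  rcases Nat.lt_or_ge r l.length with h | h
  · simp [List.getD, List.getElem?_append_left h]
  · simp only [List.getD, List.getElem?_append_right h, List.getElem?_eq_none h,
      Option.getD_none]
    rcases Nat.lt_or_ge (r - l.length) (w - l.length) with hl | hl
    · simp [hl]
    · rw [List.getElem?_eq_none (by simp only [List.length_replicate]; omega)]
      rfl

-- Characterisation of the transpose: on a nonempty family of lists all of length w it
-- yields, for each r < w, the list of r-th elements.
lemma pvZipStar_spec (w : Nat) : ∀ (xss : List (List Char)), xss ≠ [] →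
    (∀ p ∈ xss, p.length = w) →
    pvZipStar xss = (List.range w).map (fun r => xss.map (fun p => p.getD r ' ')) := by
  induction w with
  | zero =>
    intro xss hne hw
    rw [pvZipStar]
    rw [dif_pos]
    · simp
    · right
      match xss, hne with
      | x :: rest, _ =>
        simp only [List.any_cons, Bool.or_eq_true]
        left
        have := hw x (by simp)
        simp [List.eq_nil_of_length_eq_zero this]
  | succ w ih =>
    intro xss hne hw
    rw [pvZipStar]
    rw [dif_neg]
    · have htail : ∀ p ∈ xss.map List.tail, p.length = w := by
        intro p hp
        obtain ⟨q, hq, rfl⟩ := List.mem_map.mp hp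
        have := hw q hq
        simp [List.length_tail, this]
      have hne' : xss.map List.tail ≠ [] := by simpa using hne
      rw [ih _ hne' htail]
      rw [List.range_succ_eq_map]
      simp only [List.map_cons, List.map_map]
      congr 1
      · apply List.map_congr_left
        intro p hp
        have hlen := hw p hp
        cases p with
        | nil => simp at hlen
        | cons c cs => simp
      · apply List.map_congr_left
        intro r _
        simp only [Function.comp]
        apply List.map_congr_left
        intro p _
        cases p <;> simp
    · rw [not_or]
      refine ⟨hne, ?_⟩
      intro hany
      obtain ⟨p, hp, hemp⟩ := List.any_eq_true.mp hany
      have hlp := hw p hp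
      rw [List.isEmpty_iff.mp hemp] at hlp
      simp at hlp

theorem create_chart_labels_spec : Claim_equal_create_chart_labels := by
  intro cn _ hpre
  obtain ⟨hne, _⟩ := hpre
  unfold Spec_create_chart_labels create_chart_labels create_chart_labels_alt
  simp only [names_range_map]
  set names : List String := cn.map (fun d => (d.lookup "name").getD "") with hnames
  have hnames_ne : names ≠ [] := by simpa [hnames] using hne
  set width : Nat :=
    Int.toNat <| PySem.Str.len ((PySem.List.max? names (fun n => PySem.Str.len n)).getD "") with hwidth
  set padded : List (List Char) :=
    names.map (fun n => n.toList ++ List.replicate (width - n.toList.length) ' ') with hpadded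
  -- every padded name has length exactly width
  obtain ⟨m, hm⟩ : ∃ m, PySem.List.max? names (fun n => PySem.Str.len n) = some m := by
    cases h : PySem.List.max? names (fun n => PySem.Str.len n) with
    | none => exact absurd ((PySem.List.max?_eq_none_iff names (fun n => PySem.Str.len n)).mp h) hnames_ne
    | some m => exact ⟨m, rfl⟩
  have hmax := PySem.List.max?_isMax hm
  have hplen : ∀ p ∈ padded, p.length = width := by
    intro p hp
    obtain ⟨n, hn, rfl⟩ := List.mem_map.mp hp
    have hle : n.toList.length ≤ width := by
      have h1 := hmax n hn
      rw [PySem.Str.len_eq, PySem.Str.len_eq] at h1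
      rw [hwidth, hm]
      simp only [Option.getD_some, PySem.Str.len_eq]
      omega
    simp only [List.length_append, List.length_replicate]
    omega
  have hpadded_ne : padded ≠ [] := by simpa [hpadded] using hnames_ne
  rw [pvZipStar_spec width padded hpadded_ne hplen]
  rw [PySem.List.foldl_append_singleton_eq_map]
  simp only [List.nil_append, List.map_map]
  -- head row and body rows
  rw [List.singleton_append]
  congr 1
  · apply String.toList_inj.mp
    have hlen : names.length = cn.length := by simp [hnames]
    simp only [String.toList_append, String.toList_ofList, hlen]
    congr 2
    omega
  · apply List.map_congr_left
    intro r _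
    apply String.toList_inj.mp
    have hfold := foldl_str_toList names
      (fun name => String.ofList [(PySem.Str.pyGet? name (r : Int)).getD ' '] ++ "  ")
      ("" ++ ("    " ++ " "))
    have hshape : (names.foldl (fun s name =>
        (s ++ String.ofList [(PySem.Str.pyGet? name (r : Int)).getD ' ']) ++ "  ")
        ("" ++ ("    " ++ " ")))
        = (names.foldl (fun s name =>
        s ++ (String.ofList [(PySem.Str.pyGet? name (r : Int)).getD ' '] ++ "  "))
        ("" ++ ("    " ++ " "))) := by
      congr 1
      funext s name
      simp [String.append_assoc]
    rw [hshape, hfold]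
    simp only [String.toList_append, String.toList_ofList, Function.comp,
      List.flatten_eq_flatMap, List.flatMap_map, id_eq]
    have h5 : String.toList "" ++ (String.toList "    " ++ String.toList " ")
        = String.toList "     " := rfl
    have h2 : String.toList "  " = [' ', ' '] := rfl
    rw [h5]
    simp only [h2]
    congr 1
    rw [hpadded, List.map_map]
    rw [hnames]
    simp only [List.flatMap_map, Function.comp]
    apply List.flatMap_congr
    intro n _
    rw [pad_getD]
    simp
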